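-- pv_equiv track=rewrite | github.com/zaidshaikh987/New_Roadmap | roadmap.py | encode64
-- ===== SOURCE A (Python) =====
-- def encode64(data):
--     alphabet = "0123456789ABCDEFGHIJKLMNOPQRSTUVWXYZabcdefghijklmnopqrstuvwxyz-_"
--     encoded = ""
--     b = 0
--     bits = 0
--     for byte in data:
--         b = (b << 8) | byte
--         bits += 8
--         while bits >= 6:
--             bits -= 6
--             encoded += alphabet[(b >> bits) & 0x3F]
--     if bits > 0:
--         encoded += alphabet[(b << (6 - bits)) & 0x3F]
--     return encoded
-- ===== SOURCE B (Python) =====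
-- def encode64(data):
--     alphabet = "0123456789ABCDEFGHIJKLMNOPQRSTUVWXYZabcdefghijklmnopqrstuvwxyz-_"
--     buf = list(data)
--     n = len(buf)
--     out = []
--     i = 0
--     while i + 3 <= n:
--         x, y, z = buf[i], buf[i + 1], buf[i + 2]
--         out.append(alphabet[(x >> 2) & 0x3F])
--         out.append(alphabet[((x << 4) | (y >> 4)) & 0x3F])
--         out.append(alphabet[((y << 2) | (z >> 6)) & 0x3F])
--         out.append(alphabet[z & 0x3F])
--         i += 3
--     rem = n - i
--     if rem == 1:
--         x = buf[i]
--         out.append(alphabet[(x >> 2) & 0x3F])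
--         out.append(alphabet[(x << 4) & 0x3F])
--     elif rem == 2:
--         x, y = buf[i], buf[i + 1]
--         out.append(alphabet[(x >> 2) & 0x3F])
--         out.append(alphabet[((x << 4) | (y >> 4)) & 0x3F])
--         out.append(alphabet[(y << 2) & 0x3F])
--     return "".join(out)
-- ===== Notes on version B (the rewrite author's own statement) =====
-- stated objective: faster
-- what changed: B replaces A's streaming bit-buffer (shift-OR accumulator with an inner while over a bit counter, appending to a str with +=) by a 3-byte group loop that emits each output character directly from fixed shifted fragments of the one or two bytes it depends on, collecting into a list joined once at the end.
import Mathlib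
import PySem

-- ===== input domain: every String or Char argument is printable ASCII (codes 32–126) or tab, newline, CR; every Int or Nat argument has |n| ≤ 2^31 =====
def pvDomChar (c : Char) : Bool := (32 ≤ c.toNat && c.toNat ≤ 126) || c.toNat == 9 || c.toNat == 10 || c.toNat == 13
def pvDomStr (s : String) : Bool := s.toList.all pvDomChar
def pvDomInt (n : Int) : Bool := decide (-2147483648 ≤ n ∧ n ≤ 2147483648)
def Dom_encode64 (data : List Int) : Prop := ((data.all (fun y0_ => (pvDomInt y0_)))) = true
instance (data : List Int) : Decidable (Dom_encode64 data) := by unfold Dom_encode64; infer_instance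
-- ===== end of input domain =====

-- B encodes by 3-byte groups with per-character shifted-fragment formulas instead of A's streaming
-- bit buffer with an inner while loop (objective: faster — measured; A's str += and
-- ever-growing buffer int are avoided).
-- Python strings built by 'encoded += ch' are ported as List Char and converted with String.mk at the return.

-- ===== PORT A =====
-- the alphabet literal shared by both Pythons; alphabet[i] with i = (… & 0x3F) is always in 0..63, ported as getD
def pvAlphabet : List Char := "0123456789ABCDEFGHIJKLMNOPQRSTUVWXYZabcdefghijklmnopqrstuvwxyz-_".toList
def pvSym (i : Int) : Char := pvAlphabet.getD i.toNat ' '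

-- the inner 'while bits >= 6' loop; bits - 6 is nonnegative at the shift, so .toNat is exact there
def a64emit (enc : List Char) (b : Int) (bits : Int) : List Char × Int :=
  if 6 ≤ bits then
    a64emit (enc ++ [pvSym (PySem.Int.band (b >>> (bits - 6).toNat) 63)]) b (bits - 6)
  else (enc, bits)
termination_by bits.toNat
decreasing_by omega

def a64step (st : List Char × Int × Int) (byte : Int) : List Char × Int × Int :=
  let b := PySem.Int.bor (st.2.1 <<< (8 : Nat)) byte
  let r := a64emit st.1 b (st.2.2 + 8)
  (r.1, b, r.2)

def encode64 (data : List Int) : String :=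
  let st := data.foldl a64step ([], 0, 0)
  String.mk (if 0 < st.2.2 then
      st.1 ++ [pvSym (PySem.Int.band (st.2.1 <<< (6 - st.2.2).toNat) 63)]
    else st.1)

-- ===== PORT B =====
-- Source B's 'while i + 3 <= n' index loop over buf, consuming one 3-byte group per iteration,
-- then the rem == 1 / rem == 2 tail; ported as structural recursion taking 3 elements at a time
def b64loop (l : List Int) : List Char :=
  match l with
  | x :: y :: z :: rest =>
      pvSym (PySem.Int.band (x >>> (2 : Nat)) 63) ::
      pvSym (PySem.Int.band (PySem.Int.bor (x <<< (4 : Nat)) (y >>> (4 : Nat))) 63) ::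
      pvSym (PySem.Int.band (PySem.Int.bor (y <<< (2 : Nat)) (z >>> (6 : Nat))) 63) ::
      pvSym (PySem.Int.band z 63) :: b64loop rest
  | [x, y] =>
      [pvSym (PySem.Int.band (x >>> (2 : Nat)) 63),
       pvSym (PySem.Int.band (PySem.Int.bor (x <<< (4 : Nat)) (y >>> (4 : Nat))) 63),
       pvSym (PySem.Int.band (y <<< (2 : Nat)) 63)]
  | [x] =>
      [pvSym (PySem.Int.band (x >>> (2 : Nat)) 63),
       pvSym (PySem.Int.band (x <<< (4 : Nat)) 63)]
  | [] => []

def encode64_alt (data : List Int) : String := String.mk (b64loop data)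

-- ===== PRECONDITION & SPEC =====
def Spec_encode64 (data : List Int) (out : String) : Prop := out = encode64_alt data
instance (data : List Int) (out : String) : Decidable (Spec_encode64 data out) := by unfold Spec_encode64; infer_instance

-- ===== CLAIM (what is proved, stated in full; the proofs are below) =====
def Claim_equal_encode64 : Prop := ∀ (data : List Int), Dom_encode64 data → Spec_encode64 data (encode64 data)

-- ===== LEMMAS AND PROOFS =====

theorem pv_toNat2 : Int.toNat 2 = 2 := rfl
theorem pv_toNat4 : Int.toNat 4 = 4 := rfl

-- ---- Nat bitwise groundwork ----

-- disjoint OR is addition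
theorem pv_doa (x y : Nat) (h : x &&& y = 0) : x + y = x ||| y := by
  induction x using Nat.binaryRec generalizing y with
  | zero => simp
  | bit b m ih =>
    rw [← Nat.bit_decide_mod_two_eq_one_shiftRight_one y] at h ⊢
    rw [Nat.land_bit] at h
    obtain ⟨h1, h2⟩ := Nat.bit_eq_zero_iff.mp h
    rw [Nat.lor_bit, Nat.bit_val, Nat.bit_val, Nat.bit_val, ← ih _ h1]
    have hcv : (decide (y % 2 = 1)).toNat = y % 2 := by
      rcases Nat.mod_two_eq_zero_or_one y with hm | hm <;> simp [hm]
    have hyy : y >>> 1 = y / 2 := Nat.shiftRight_one y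
    cases b with
    | false =>
      rw [Bool.false_or]
      simp only [Bool.toNat_false]
      omega
    | true =>
      rw [Bool.true_and] at h2
      rw [h2] at hcv ⊢
      simp only [Bool.toNat_false, Bool.true_or, Bool.toNat_true] at hcv ⊢
      omega

-- ldiff as subtraction of the common part
theorem pv_ldiff_eq (m n : Nat) : m.ldiff n = m - (m &&& n) := by
  have hd : (m &&& n) &&& m.ldiff n = 0 := by
    apply Nat.eq_of_testBit_eq
    intro i
    simp only [Nat.testBit_and, Nat.testBit_ldiff, Nat.zero_testBit]
    cases m.testBit i <;> cases n.testBit i <;> simp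
  have ho : (m &&& n) ||| m.ldiff n = m := by
    apply Nat.eq_of_testBit_eq
    intro i
    simp only [Nat.testBit_or, Nat.testBit_and, Nat.testBit_ldiff]
    cases m.testBit i <;> cases n.testBit i <;> simp
  have := pv_doa _ _ hd
  omega

-- ---- PySem bitwise = Mathlib Int bitwise ----

theorem pv_neg_toNat (n : Nat) : (-(Int.negSucc n) - 1).toNat = n := by
  rw [Int.negSucc_eq]; omega

theorem pv_nonneg_ofNat (n : Nat) : (0 : Int) ≤ Int.ofNat n := Int.natCast_nonneg n
theorem pv_not_nonneg_negSucc (n : Nat) : ¬ (0 : Int) ≤ Int.negSucc n :=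
  Int.not_le.mpr (Int.negSucc_lt_zero n)

theorem pv_bor_lor (a b : Int) : PySem.Int.bor a b = Int.lor a b := by
  cases a with
  | ofNat m =>
    cases b with
    | ofNat n =>
      show PySem.Int.bor _ _ = Int.ofNat (m ||| n)
      unfold PySem.Int.bor
      rw [if_pos (pv_nonneg_ofNat m), if_pos (pv_nonneg_ofNat n)]
      rfl
    | negSucc n =>
      show PySem.Int.bor _ _ = Int.negSucc (n.ldiff m)
      unfold PySem.Int.bor
      rw [if_pos (pv_nonneg_ofNat m), if_neg (pv_not_nonneg_negSucc n), pv_neg_toNat,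
        show (Int.ofNat m).toNat = m from rfl, pv_ldiff_eq, Int.negSucc_eq]
      have hle : n &&& m ≤ n := Nat.and_le_left
      omega
  | negSucc m =>
    cases b with
    | ofNat n =>
      show PySem.Int.bor _ _ = Int.negSucc (m.ldiff n)
      unfold PySem.Int.bor
      rw [if_neg (pv_not_nonneg_negSucc m), if_pos (pv_nonneg_ofNat n), pv_neg_toNat,
        show (Int.ofNat n).toNat = n from rfl, pv_ldiff_eq, Int.negSucc_eq]
      have hle : m &&& n ≤ m := Nat.and_le_left
      omega
    | negSucc n =>
      show PySem.Int.bor _ _ = Int.negSucc (m &&& n)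
      unfold PySem.Int.bor
      rw [if_neg (pv_not_nonneg_negSucc m), if_neg (pv_not_nonneg_negSucc n), pv_neg_toNat,
        pv_neg_toNat, Int.negSucc_eq]
      omega

theorem pv_band_land (a b : Int) : PySem.Int.band a b = Int.land a b := by
  cases a with
  | ofNat m =>
    cases b with
    | ofNat n =>
      show PySem.Int.band _ _ = Int.ofNat (m &&& n)
      unfold PySem.Int.band
      rw [if_pos (pv_nonneg_ofNat m), if_pos (pv_nonneg_ofNat n)]
      rfl
    | negSucc n =>
      show PySem.Int.band _ _ = Int.ofNat (m.ldiff n)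
      unfold PySem.Int.band
      rw [if_pos (pv_nonneg_ofNat m), if_neg (pv_not_nonneg_negSucc n), pv_neg_toNat,
        show (Int.ofNat m).toNat = m from rfl, pv_ldiff_eq]
      rfl
  | negSucc m =>
    cases b with
    | ofNat n =>
      show PySem.Int.band _ _ = Int.ofNat (n.ldiff m)
      unfold PySem.Int.band
      rw [if_neg (pv_not_nonneg_negSucc m), if_pos (pv_nonneg_ofNat n), pv_neg_toNat,
        show (Int.ofNat n).toNat = n from rfl, pv_ldiff_eq]
      rfl
    | negSucc n =>
      show PySem.Int.band _ _ = Int.negSucc (m ||| n)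
      unfold PySem.Int.band
      rw [if_neg (pv_not_nonneg_negSucc m), if_neg (pv_not_nonneg_negSucc n), pv_neg_toNat,
        pv_neg_toNat, Int.negSucc_eq]
      omega

-- ---- testBit toolkit on Int ----

theorem pv_tb_ofNat (m : Nat) (i : Nat) : Int.testBit (Int.ofNat m) i = m.testBit i := rfl
theorem pv_tb_negSucc (m : Nat) (i : Nat) : Int.testBit (Int.negSucc m) i = !(m.testBit i) := rfl
theorem pv_shr_ofNat (m : Nat) (k : Nat) : Int.ofNat m >>> k = Int.ofNat (m >>> k) := rfl
theorem pv_shr_negSucc (m : Nat) (k : Nat) : Int.negSucc m >>> k = Int.negSucc (m >>> k) := rfl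
theorem pv_shl_ofNat (m : Nat) (k : Nat) : Int.ofNat m <<< k = Int.ofNat (m <<< k) := rfl
theorem pv_shl_negSucc (m : Nat) (k : Nat) : Int.negSucc m <<< k = Int.negSucc ((m + 1) <<< k - 1) := rfl

theorem pv_int_ext (a b : Int) (h : ∀ i, a.testBit i = b.testBit i) : a = b := by
  cases a with
  | ofNat m =>
    cases b with
    | ofNat n =>
      congr 1
      apply Nat.eq_of_testBit_eq
      intro i; simpa [pv_tb_ofNat] using h i
    | negSucc n =>
      exfalso
      have hi := h (m + n)
      rw [pv_tb_ofNat, pv_tb_negSucc,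
          Nat.testBit_lt_two_pow (lt_of_lt_of_le Nat.lt_two_pow_self (Nat.pow_le_pow_right (by norm_num) (by omega))),
          Nat.testBit_lt_two_pow (lt_of_lt_of_le Nat.lt_two_pow_self (Nat.pow_le_pow_right (by norm_num) (by omega)))] at hi
      simp at hi
  | negSucc m =>
    cases b with
    | ofNat n =>
      exfalso
      have hi := h (m + n)
      rw [pv_tb_ofNat, pv_tb_negSucc,
          Nat.testBit_lt_two_pow (lt_of_lt_of_le Nat.lt_two_pow_self (Nat.pow_le_pow_right (by norm_num) (by omega))),
          Nat.testBit_lt_two_pow (lt_of_lt_of_le Nat.lt_two_pow_self (Nat.pow_le_pow_right (by norm_num) (by omega)))] at hi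
      simp at hi
    | negSucc n =>
      congr 1
      apply Nat.eq_of_testBit_eq
      intro i
      have hi := h i
      rw [pv_tb_negSucc, pv_tb_negSucc] at hi
      simpa using hi

theorem pv_tb_bor (a b : Int) (i : Nat) :
    (PySem.Int.bor a b).testBit i = (a.testBit i || b.testBit i) := by
  rw [pv_bor_lor]; exact Int.testBit_lor a b i

theorem pv_tb_band (a b : Int) (i : Nat) :
    (PySem.Int.band a b).testBit i = (a.testBit i && b.testBit i) := by
  rw [pv_band_land]; exact Int.testBit_land a b i

theorem pv_tb_shr (a : Int) (k i : Nat) : (a >>> k).testBit i = a.testBit (i + k) := by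
  cases a with
  | ofNat m =>
    rw [pv_shr_ofNat, pv_tb_ofNat, pv_tb_ofNat, Nat.testBit_shiftRight, Nat.add_comm k i]
  | negSucc m =>
    rw [pv_shr_negSucc, pv_tb_negSucc, pv_tb_negSucc, Nat.testBit_shiftRight, Nat.add_comm k i]

theorem pv_shl_sub_rep (n k : Nat) : (n + 1) <<< k - 1 = (n <<< k) ||| (2 ^ k - 1) := by
  rw [← pv_doa]
  · rw [Nat.shiftLeft_eq, Nat.shiftLeft_eq, Nat.succ_mul]
    have := Nat.two_pow_pos k
    omega
  · apply Nat.eq_of_testBit_eq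
    intro i
    simp only [Nat.testBit_and, Nat.testBit_shiftLeft, Nat.testBit_two_pow_sub_one, Nat.zero_testBit]
    by_cases hik : i < k
    · simp [hik, (by omega : ¬ i ≥ k)]
    · simp [hik, (by omega : i ≥ k)]

theorem pv_tb_shl (a : Int) (k i : Nat) :
    (a <<< k).testBit i = (decide (i ≥ k) && a.testBit (i - k)) := by
  cases a with
  | ofNat m =>
    rw [pv_shl_ofNat, pv_tb_ofNat, pv_tb_ofNat, Nat.testBit_shiftLeft]
  | negSucc m =>
    rw [pv_shl_negSucc, pv_tb_negSucc, pv_tb_negSucc, pv_shl_sub_rep, Nat.testBit_or,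
        Nat.testBit_shiftLeft, Nat.testBit_two_pow_sub_one]
    by_cases hik : i < k
    · simp [hik, (by omega : ¬ i ≥ k)]
    · simp [hik, (by omega : i ≥ k)]

theorem pv_tb_63 (i : Nat) : (63 : Int).testBit i = decide (i < 6) := by
  show Nat.testBit 63 i = decide (i < 6)
  simpa using Nat.testBit_two_pow_sub_one 6 i

-- ---- the six per-character identities: A's window into its running buffer only sees
-- ---- the current chunk's shifted fragments ----

theorem pv_c1 (b x : Int) :
    PySem.Int.band ((PySem.Int.bor (b <<< (8:Nat)) x) >>> (2:Nat)) 63 =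
    PySem.Int.band (x >>> (2:Nat)) 63 := by
  apply pv_int_ext; intro i
  simp only [pv_tb_band, pv_tb_bor, pv_tb_shl, pv_tb_shr, pv_tb_63]
  by_cases hi : i < 6
  · interval_cases i <;> simp
  · simp [hi]

theorem pv_c5 (b x : Int) :
    PySem.Int.band ((PySem.Int.bor (b <<< (8:Nat)) x) <<< (4:Nat)) 63 =
    PySem.Int.band (x <<< (4:Nat)) 63 := by
  apply pv_int_ext; intro i
  simp only [pv_tb_band, pv_tb_bor, pv_tb_shl, pv_tb_shr, pv_tb_63]
  by_cases hi : i < 6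
  · interval_cases i <;> simp
  · simp [hi]

theorem pv_c2 (b x y : Int) :
    PySem.Int.band ((PySem.Int.bor ((PySem.Int.bor (b <<< (8:Nat)) x) <<< (8:Nat)) y) >>> (4:Nat)) 63 =
    PySem.Int.band (PySem.Int.bor (x <<< (4:Nat)) (y >>> (4:Nat))) 63 := by
  apply pv_int_ext; intro i
  simp only [pv_tb_band, pv_tb_bor, pv_tb_shl, pv_tb_shr, pv_tb_63]
  by_cases hi : i < 6
  · interval_cases i <;> simp
  · simp [hi]

theorem pv_c6 (b x y : Int) :
    PySem.Int.band ((PySem.Int.bor ((PySem.Int.bor (b <<< (8:Nat)) x) <<< (8:Nat)) y) <<< (2:Nat)) 63 =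
    PySem.Int.band (y <<< (2:Nat)) 63 := by
  apply pv_int_ext; intro i
  simp only [pv_tb_band, pv_tb_bor, pv_tb_shl, pv_tb_shr, pv_tb_63]
  by_cases hi : i < 6
  · interval_cases i <;> simp
  · simp [hi]

theorem pv_c3 (b x y z : Int) :
    PySem.Int.band ((PySem.Int.bor ((PySem.Int.bor ((PySem.Int.bor (b <<< (8:Nat)) x) <<< (8:Nat)) y) <<< (8:Nat)) z) >>> (6:Nat)) 63 =
    PySem.Int.band (PySem.Int.bor (y <<< (2:Nat)) (z >>> (6:Nat))) 63 := by
  apply pv_int_ext; intro i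
  simp only [pv_tb_band, pv_tb_bor, pv_tb_shl, pv_tb_shr, pv_tb_63]
  by_cases hi : i < 6
  · interval_cases i <;> simp
  · simp [hi]

theorem pv_c4 (b x y z : Int) :
    PySem.Int.band (PySem.Int.bor ((PySem.Int.bor ((PySem.Int.bor (b <<< (8:Nat)) x) <<< (8:Nat)) y) <<< (8:Nat)) z) 63 =
    PySem.Int.band z 63 := by
  apply pv_int_ext; intro i
  simp only [pv_tb_band, pv_tb_bor, pv_tb_shl, pv_tb_shr, pv_tb_63]
  by_cases hi : i < 6
  · interval_cases i <;> simp
  · simp [hi]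

-- ---- evaluations of the inner while loop at the three bit counts the for loop produces ----
theorem pv_emit8 (enc : List Char) (b : Int) :
    a64emit enc b 8 = (enc ++ [pvSym (PySem.Int.band (b >>> (2 : Nat)) 63)], 2) := by
  rw [a64emit]; norm_num [pv_toNat2]; rw [a64emit]; norm_num
theorem pv_emit10 (enc : List Char) (b : Int) :
    a64emit enc b 10 = (enc ++ [pvSym (PySem.Int.band (b >>> (4 : Nat)) 63)], 4) := by
  rw [a64emit]; norm_num [pv_toNat4]; rw [a64emit]; norm_num
theorem pv_emit12 (enc : List Char) (b : Int) :
    a64emit enc b 12 =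
      (enc ++ [pvSym (PySem.Int.band (b >>> (6 : Nat)) 63), pvSym (PySem.Int.band (b >>> (0 : Nat)) 63)], 0) := by
  rw [a64emit]; norm_num [show Int.toNat 6 = 6 from rfl]; rw [a64emit]
  norm_num [show Int.toNat 0 = 0 from rfl]; rw [a64emit]; norm_num

-- ---- main invariant: from a flushed state (bits = 0), A's remaining loop plus its tail
-- ---- emits exactly B's group encoding of the remaining bytes ----
theorem pv_main (l : List Int) (enc : List Char) (b : Int) :
    (let st := l.foldl a64step (enc, b, 0)
     if 0 < st.2.2 then
       st.1 ++ [pvSym (PySem.Int.band (st.2.1 <<< (6 - st.2.2).toNat) 63)]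
     else st.1) = enc ++ b64loop l := by
  induction l using b64loop.induct generalizing enc b with
  | case4 => simp [b64loop]
  | case3 x =>
    simp only [List.foldl, a64step, zero_add]
    rw [pv_emit8]
    norm_num [pv_toNat4, b64loop]
    rw [pv_c1, pv_c5]
    exact ⟨rfl, rfl⟩
  | case2 x y =>
    simp only [List.foldl, a64step, zero_add]
    rw [pv_emit8]
    norm_num
    rw [pv_emit10]
    norm_num [pv_toNat2, b64loop]
    rw [pv_c1, pv_c2, pv_c6]
    exact ⟨rfl, rfl, rfl⟩
  | case1 x y z rest ih =>
    simp only [List.foldl, a64step, zero_add]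
    rw [pv_emit8]
    norm_num
    rw [pv_emit10]
    norm_num
    rw [pv_emit12]
    norm_num
    have ihs : ∀ (e : List Char) (bb : Int),
        (if 0 < (List.foldl a64step (e, bb, 0) rest).2.2 then
          (List.foldl a64step (e, bb, 0) rest).1 ++
            [pvSym (PySem.Int.band ((List.foldl a64step (e, bb, 0) rest).2.1 <<<
              (6 - (List.foldl a64step (e, bb, 0) rest).2.2).toNat) 63)]
        else (List.foldl a64step (e, bb, 0) rest).1) = e ++ b64loop rest := by
      intro e bb
      have h' := ih e bb
      simpa using h'
    rw [ihs]
    norm_num [b64loop]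
    rw [pv_c1, pv_c2, pv_c3, pv_c4]
    exact ⟨rfl, rfl, rfl, rfl⟩

-- ===== VERDICT (by name: the statement is the Claim_ definition above) =====
theorem encode64_spec : Claim_equal_encode64 := by
  intro data _
  unfold Spec_encode64 encode64 encode64_alt
  have := pv_main data [] 0
  simp only at this ⊢
  rw [this, List.nil_append]
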